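-- pv_equiv track=rewrite | github.com/miliar/Code_Jam_Webscraper | Solutions_in_python/Problem_168/prob1.py | getBadCoords
-- ===== SOURCE A (Python) =====
-- def getBadCoords(arr):
--     # Return (badCoords, impossibleCoords)
--     badCoords = []
--
--     for i in range(len(arr)):
--         for j in range(len(arr[i])):
--             if arr[i][j] == 1:
--                 bad = True
--                 k = i-1
--                 while k >= 0:
--                     if arr[k][j] != 0:
--                         bad = False
--                         break
--                     k -= 1
--                 if bad == True:
--                     badCoords += [(i,j)]
--             elif arr[i][j] == 2:
--                 bad = True
--                 k = j+1
--                 while k <= len(arr[i])-1: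
--                     if arr[i][k] != 0:
--                         bad = False
--                         break
--                     k += 1
--                 if bad == True:
--                     badCoords += [(i,j)]
--             elif arr[i][j] == 3:
--                 bad = True
--                 k = i+1
--                 while k <= len(arr)-1:
--                     if arr[k][j] != 0:
--                         bad = False
--                         break
--                     k += 1
--                 if bad == True:
--                     badCoords += [(i,j)]
--             elif arr[i][j] == 4:
--                 bad = True
--                 k = j-1
--                 while k >= 0:
--                     if arr[i][k] != 0:
--                         bad = False
--                         break
--                     k -= 1
--                 if bad == True:
--                     badCoords += [(i,j)]
--
--
--     for badCoord in badCoords: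
--         i = badCoord[0]
--         j = badCoord[1]
--         count = 0
--         for k in range(len(arr)):
--             if arr[k][j] != 0:
--                 count += 1
--         for k in range(len(arr[0])):
--             if arr[i][k] != 0:
--                 count += 1
--         if count <= 2:
--             return badCoords, [(i,j)]
--
--     return badCoords, []
-- ===== SOURCE B (Python) =====
-- def _prefix_flags(vals):
--     # flags[i] = True iff some nonzero appears among vals[:i]
--     flags = []
--     seen = False
--     for v in vals:
--         flags.append(seen)
--         seen = seen or v != 0
--     return flags
--
--
-- def getBadCoords(arr):
--     # Linear precomputation: directional "nonzero seen" flags + row/col nonzero counts.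
--     R = len(arr)
--     C = len(arr[0]) if arr else 0
--     cols = [[arr[i][j] for i in range(R)] for j in range(C)]
--     left = [_prefix_flags(row) for row in arr]
--     right = [list(reversed(_prefix_flags(list(reversed(row))))) for row in arr]
--     up_cols = [_prefix_flags(col) for col in cols]
--     down_cols = [list(reversed(_prefix_flags(list(reversed(col))))) for col in cols]
--     row_count = [sum(1 for v in row if v != 0) for row in arr]
--     col_count = [sum(1 for v in col if v != 0) for col in cols]
--     badCoords = []
--     imp = []
--     for i in range(R):
--         for j in range(C):
--             v = arr[i][j]
--             if ((v == 1 and not up_cols[j][i]) or (v == 2 and not right[i][j])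
--                     or (v == 3 and not down_cols[j][i]) or (v == 4 and not left[i][j])):
--                 badCoords.append((i, j))
--                 if not imp and row_count[i] + col_count[j] <= 2:
--                     imp = [(i, j)]
--     return badCoords, imp
-- ===== Notes on version B (the rewrite author's own statement) =====
-- stated objective: alternative
-- what changed: replaces A's per-arrow directional re-scans and per-bad-cell counting loops with prefix/suffix nonzero-seen flags and row/column nonzero counts, each precomputed once in linear passes (worst-case O(R*C) vs A's O(R*C*(R+C)), but not measurably faster on the generated inputs)
-- outside the precondition, e.g. on getBadCoords([[0, 0], [0]]): A returns ([], []), B raises IndexError; on getBadCoords([[0, 2], [0, 0, 2]]): A returns ([(0, 1), (1, 2)], [(0, 1)]), B returns ([(0, 1)], [(0, 1)])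
import Mathlib
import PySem

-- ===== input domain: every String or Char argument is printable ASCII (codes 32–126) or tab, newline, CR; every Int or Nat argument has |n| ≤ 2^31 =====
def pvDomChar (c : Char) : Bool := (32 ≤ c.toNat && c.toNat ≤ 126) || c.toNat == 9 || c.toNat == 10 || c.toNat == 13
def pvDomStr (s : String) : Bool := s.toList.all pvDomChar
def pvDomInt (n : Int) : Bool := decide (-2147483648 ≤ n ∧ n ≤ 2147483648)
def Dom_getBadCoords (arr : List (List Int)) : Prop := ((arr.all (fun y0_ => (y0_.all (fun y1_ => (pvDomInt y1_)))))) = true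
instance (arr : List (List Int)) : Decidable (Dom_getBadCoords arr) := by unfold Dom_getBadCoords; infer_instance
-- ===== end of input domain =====

-- B replaces A's per-arrow directional re-scans and per-bad-cell counting loops by
-- precomputed prefix/suffix nonzero-seen flags and row/column nonzero counts (linear passes).


-- ===== PORT A =====
-- arr[i][j]: plain indexing; exact under Pre_ (rectangular grid keeps every access in range)
def pvAt (arr : List (List Int)) (i j : Nat) : Int := (arr.getD i []).getD j 0

-- 'k = i-1; while k >= 0: if arr[k][j] != 0: bad = False; break; k -= 1' (value = bad)
def upBadA (arr : List (List Int)) (j : Nat) : Nat → Bool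
  | 0 => true
  | k + 1 => if pvAt arr k j != 0 then false else upBadA arr j k

-- 'k = i+1; while k <= len(arr)-1: …; k += 1'
def downBadA (arr : List (List Int)) (j R k : Nat) : Bool :=
  if _h : k < R then (if pvAt arr k j != 0 then false else downBadA arr j R (k + 1)) else true
termination_by R - k

-- 'k = j+1; while k <= len(arr[i])-1: …; k += 1'
def rightBadA (row : List Int) (C k : Nat) : Bool :=
  if _h : k < C then (if row.getD k 0 != 0 then false else rightBadA row C (k + 1)) else true
termination_by C - k

-- 'k = j-1; while k >= 0: …; k -= 1'
def leftBadA (row : List Int) : Nat → Bool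
  | 0 => true
  | k + 1 => if row.getD k 0 != 0 then false else leftBadA row k

-- the body of the inner loop: one cell of the first nested loop
def cellCheckA (arr : List (List Int)) (i : Nat) (acc : List (Nat × Nat)) (j : Nat) :
    List (Nat × Nat) :=
  if pvAt arr i j == 1 then
    (if upBadA arr j i then acc ++ [(i, j)] else acc)
  else if pvAt arr i j == 2 then
    (if rightBadA (arr.getD i []) (arr.getD i []).length (j + 1) then acc ++ [(i, j)] else acc)
  else if pvAt arr i j == 3 then
    (if downBadA arr j arr.length (i + 1) then acc ++ [(i, j)] else acc)
  else if pvAt arr i j == 4 then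
    (if leftBadA (arr.getD i []) j then acc ++ [(i, j)] else acc)
  else acc

-- the first nested loop building badCoords
def badCellsA (arr : List (List Int)) : List (Nat × Nat) :=
  (List.range arr.length).foldl (fun acc i =>
    (List.range (arr.getD i []).length).foldl (cellCheckA arr i) acc) []

-- the 'count' of the second loop: column pass then row pass over range(len(arr[0]))
def countA (arr : List (List Int)) (i j : Nat) : Int :=
  let c1 := (List.range arr.length).foldl (fun c k => if pvAt arr k j != 0 then c + 1 else c) (0 : Int)
  (List.range (arr.getD 0 []).length).foldl (fun c k => if pvAt arr i k != 0 then c + 1 else c) c1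

-- 'for badCoord in badCoords: … if count <= 2: return badCoords, [(i,j)]'
def findImpA (arr : List (List Int)) : List (Nat × Nat) → List (Nat × Nat)
  | [] => []
  | c :: rest => if countA arr c.1 c.2 ≤ 2 then [c] else findImpA arr rest

def getBadCoords (arr : List (List Int)) : (List (Int × Int)) × (List (Int × Int)) :=
  ((badCellsA arr).map (fun c => ((c.1 : Int), (c.2 : Int))),
   (findImpA arr (badCellsA arr)).map (fun c => ((c.1 : Int), (c.2 : Int))))

-- ===== PORT B =====
-- _prefix_flags: flags[i] = True iff a nonzero appears among vals[:i]
def prefixFlagsGo : Bool → List Int → List Bool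
  | _, [] => []
  | seen, v :: vs => seen :: prefixFlagsGo (seen || v != 0) vs

def prefixFlags (vals : List Int) : List Bool := prefixFlagsGo false vals

-- sum(1 for v in l if v != 0)
def nzCount (l : List Int) : Int := l.foldl (fun c v => if v != 0 then c + 1 else c) 0

def getBadCoords_alt (arr : List (List Int)) : (List (Int × Int)) × (List (Int × Int)) :=
  let R := arr.length
  let C := (arr.headD []).length          -- len(arr[0]) if arr else 0
  -- cols = [[arr[i][j] for i in range(R)] for j in range(C)]; indexing exact under Pre_
  let cols := (List.range C).map (fun j => (List.range R).map (fun i => pvAt arr i j))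
  let left := arr.map prefixFlags
  let right := arr.map (fun row => (prefixFlags row.reverse).reverse)
  let upCols := cols.map prefixFlags
  let downCols := cols.map (fun col => (prefixFlags col.reverse).reverse)
  let rowCount := arr.map nzCount
  let colCount := cols.map nzCount
  let res := (List.range R).foldl (fun st i =>
    (List.range C).foldl (fun st j =>
      let v := pvAt arr i j
      if (v == 1 && !((upCols.getD j []).getD i false))
          || (v == 2 && !((right.getD i []).getD j false))
          || (v == 3 && !((downCols.getD j []).getD i false))
          || (v == 4 && !((left.getD i []).getD j false)) then
        (st.1 ++ [(i, j)],
         if st.2 = [] ∧ rowCount.getD i 0 + colCount.getD j 0 ≤ 2 then [(i, j)] else st.2)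
      else st) st) (([], []) : List (Nat × Nat) × List (Nat × Nat))
  (res.1.map (fun c => ((c.1 : Int), (c.2 : Int))),
   res.2.map (fun c => ((c.1 : Int), (c.2 : Int))))

-- ===== PRECONDITION & SPEC =====
-- Pre_ admits rectangular grids and grids whose rows only extend the first row's width with
-- zeros; it excludes other ragged (malformed) inputs, on which A's scans can raise IndexError
-- (B then raises too) or, where both return, the value depends on accidents of raggedness.
def Pre_getBadCoords (arr : List (List Int)) : Prop :=
  ∀ row ∈ arr, (arr.headD []).length ≤ row.length ∧
    ((row.drop ((arr.headD []).length)).all (fun v => v == 0)) = true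
instance (arr : List (List Int)) : Decidable (Pre_getBadCoords arr) := by
  unfold Pre_getBadCoords; infer_instance

def pvWitness_getBadCoords : List (List Int) := [[1, 0, 2], [0, 0, 0], [4, 0, 3]]

def Spec_getBadCoords (arr : List (List Int)) (out : (List (Int × Int)) × (List (Int × Int))) : Prop := out = getBadCoords_alt arr
instance (arr : List (List Int)) (out : (List (Int × Int)) × (List (Int × Int))) : Decidable (Spec_getBadCoords arr out) := by unfold Spec_getBadCoords; infer_instance

-- ===== CLAIM (what is proved, stated in full; the proofs are below) =====
def Claim_equal_getBadCoords : Prop := ∀ (arr : List (List Int)), Dom_getBadCoords arr → Pre_getBadCoords arr → Spec_getBadCoords arr (getBadCoords arr)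



-- ===== LEMMAS AND PROOFS =====

-- the column j of arr, as B's 'cols' builds it
def colMap (arr : List (List Int)) (j : Nat) : List Int :=
  (List.range arr.length).map (fun i => pvAt arr i j)

-- A's per-cell decision, as a single boolean
def chainA (arr : List (List Int)) (i j : Nat) : Bool :=
  if pvAt arr i j == 1 then upBadA arr j i
  else if pvAt arr i j == 2 then rightBadA (arr.getD i []) (arr.getD i []).length (j + 1)
  else if pvAt arr i j == 3 then downBadA arr j arr.length (i + 1)
  else if pvAt arr i j == 4 then leftBadA (arr.getD i []) j
  else false

-- B's per-cell decision and count test, with the let-bound tables spelled out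
def colsB (arr : List (List Int)) : List (List Int) :=
  (List.range (arr.headD []).length).map (fun j => (List.range arr.length).map (fun i => pvAt arr i j))

def pB (arr : List (List Int)) (i j : Nat) : Bool :=
  (pvAt arr i j == 1 && !(((colsB arr).map prefixFlags).getD j []).getD i false)
  || (pvAt arr i j == 2 && !((arr.map (fun row => (prefixFlags row.reverse).reverse)).getD i []).getD j false)
  || (pvAt arr i j == 3 && !(((colsB arr).map (fun col => (prefixFlags col.reverse).reverse)).getD j []).getD i false)
  || (pvAt arr i j == 4 && !((arr.map prefixFlags).getD i []).getD j false)

def cellsOf (R C : Nat) : List (Nat × Nat) :=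
  (List.range R).flatMap (fun i => (List.range C).map (fun j => (i, j)))

lemma mem_cellsOf {R C : Nat} {c : Nat × Nat} : c ∈ cellsOf R C ↔ c.1 < R ∧ c.2 < C := by
  cases c with
  | mk i j =>
    simp only [cellsOf, List.mem_flatMap, List.mem_map, List.mem_range, Prod.mk.injEq]
    constructor
    · rintro ⟨a, ha, b, hb, h1, h2⟩; subst h1; subst h2; exact ⟨ha, hb⟩
    · rintro ⟨h1, h2⟩; exact ⟨i, h1, j, h2, rfl, rfl⟩

lemma getD_reverse {α : Type} (l : List α) (d : α) (k : Nat) (h : k < l.length) :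
    l.reverse.getD k d = l.getD (l.length - 1 - k) d := by
  rw [List.getD_eq_getElem?_getD, List.getD_eq_getElem?_getD, List.getElem?_reverse (by simpa using h)]

lemma length_prefixFlagsGo (s : Bool) (l : List Int) : (prefixFlagsGo s l).length = l.length := by
  induction l generalizing s with
  | nil => rfl
  | cons v vs ih => simp [prefixFlagsGo, ih]

lemma prefixFlagsGo_getD (l : List Int) : ∀ (i : Nat) (s : Bool), i < l.length →
    (prefixFlagsGo s l).getD i false = (s || decide (∃ k < i, l.getD k 0 ≠ 0)) := by
  induction l with
  | nil => intro i s h; simp at h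
  | cons v vs ih =>
    intro i s h
    cases i with
    | zero => simp [prefixFlagsGo]
    | succ n =>
      have hn : n < vs.length := by simpa using h
      have hrec := ih n (s || v != 0) hn
      simp only [prefixFlagsGo, List.getD_cons_succ]
      rw [hrec]
      have hiff : (∃ k < n + 1, (v :: vs).getD k 0 ≠ 0) ↔ (v ≠ 0 ∨ ∃ k < n, vs.getD k 0 ≠ 0) := by
        constructor
        · rintro ⟨k, hk, hne⟩
          cases k with
          | zero => exact Or.inl (by simpa using hne)
          | succ m => exact Or.inr ⟨m, by omega, by simpa using hne⟩
        · rintro (hne | ⟨k, hk, hne⟩)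
          · exact ⟨0, by omega, by simpa using hne⟩
          · exact ⟨k + 1, by omega, by simpa using hne⟩
      cases s with
      | true => simp
      | false =>
        simp only [Bool.false_or]
        by_cases hv : v = 0
        · have hb : (v != 0) = false := by simp [hv]
          rw [hb, Bool.false_or, decide_eq_decide, hiff]
          simp [hv]
        · have hb : (v != 0) = true := by simp [hv]
          rw [hb, Bool.true_or]
          symm
          rw [decide_eq_true_eq]
          exact ⟨0, by omega, by simpa using hv⟩

lemma prefixFlags_not_getD (l : List Int) (i : Nat) (h : i < l.length) :
    (!(prefixFlags l).getD i false) = decide (∀ k < i, l.getD k 0 = 0) := by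
  rw [prefixFlags, prefixFlagsGo_getD l i false h]
  simp only [Bool.false_or, ← decide_not]
  rw [decide_eq_decide]
  constructor
  · intro hne k hk
    by_contra hc
    exact hne ⟨k, hk, hc⟩
  · rintro hall ⟨k, hk, hne⟩
    exact hne (hall k hk)

lemma sufFlags_not_getD (l : List Int) (i : Nat) (h : i < l.length) :
    (!((prefixFlags l.reverse).reverse.getD i false)) =
      decide (∀ m < l.length, i < m → l.getD m 0 = 0) := by
  have hlen : (prefixFlags l.reverse).length = l.length := by
    rw [prefixFlags, length_prefixFlagsGo, List.length_reverse]
  rw [getD_reverse _ _ _ (by rw [hlen]; exact h), hlen]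
  rw [prefixFlags, prefixFlagsGo_getD _ _ _ (by rw [List.length_reverse]; omega)]
  simp only [Bool.false_or, ← decide_not]
  rw [decide_eq_decide]
  constructor
  · intro hne m hm him
    by_contra hc
    apply hne
    refine ⟨l.length - 1 - m, by omega, ?_⟩
    rw [getD_reverse _ _ _ (by omega),
        show l.length - 1 - (l.length - 1 - m) = m from by omega]
    exact hc
  · rintro hall ⟨k, hk, hne⟩
    apply hne
    rw [getD_reverse _ _ _ (by omega)]
    exact hall (l.length - 1 - k) (by omega) (by omega)

lemma upBadA_eq (arr : List (List Int)) (j : Nat) : ∀ i,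
    upBadA arr j i = decide (∀ k < i, pvAt arr k j = 0) := by
  intro i
  induction i with
  | zero => simp [upBadA]
  | succ n ih =>
    rw [upBadA]
    by_cases h : pvAt arr n j = 0
    · rw [if_neg (by simp [h]), ih, decide_eq_decide]
      constructor
      · intro hall k hk
        rcases Nat.lt_succ_iff_lt_or_eq.mp hk with hk | hk
        · exact hall k hk
        · subst hk; exact h
      · intro hall k hk
        exact hall k (by omega)
    · rw [if_pos (by simp [h])]
      symm
      rw [decide_eq_false_iff_not]
      intro hall
      exact h (hall n (by omega))

lemma downBadA_eq (arr : List (List Int)) (j R : Nat) : ∀ k,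
    downBadA arr j R k = decide (∀ m < R, k ≤ m → pvAt arr m j = 0) := by
  intro k
  induction hfuel : R - k using Nat.strong_induction_on generalizing k with
  | _ n ih =>
    rw [downBadA]
    split
    · rename_i hk
      by_cases h : pvAt arr k j = 0
      · rw [if_neg (by simp [h]), ih (R - (k + 1)) (by omega) (k + 1) rfl, decide_eq_decide]
        constructor
        · intro hall m hm1 hm2
          rcases Nat.eq_or_lt_of_le hm2 with he | hl
          · subst he; exact h
          · exact hall m hm1 hl
        · intro hall m hm1 hm2
          exact hall m hm1 (by omega)
      · rw [if_pos (by simp [h])]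
        symm
        rw [decide_eq_false_iff_not]
        intro hall
        exact h (hall k hk (le_refl k))
    · rename_i hk
      symm
      rw [decide_eq_true_eq]
      intro m hm1 hm2; omega

lemma rightBadA_eq (row : List Int) (C : Nat) : ∀ k,
    rightBadA row C k = decide (∀ m < C, k ≤ m → row.getD m 0 = 0) := by
  intro k
  induction hfuel : C - k using Nat.strong_induction_on generalizing k with
  | _ n ih =>
    rw [rightBadA]
    split
    · rename_i hk
      by_cases h : row.getD k 0 = 0
      · rw [if_neg (by simpa using h), ih (C - (k + 1)) (by omega) (k + 1) rfl, decide_eq_decide]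
        constructor
        · intro hall m hm1 hm2
          rcases Nat.eq_or_lt_of_le hm2 with he | hl
          · subst he; exact h
          · exact hall m hm1 hl
        · intro hall m hm1 hm2
          exact hall m hm1 (by omega)
      · rw [if_pos (by simpa using h)]
        symm
        rw [decide_eq_false_iff_not]
        intro hall
        exact h (hall k hk (le_refl k))
    · rename_i hk
      symm
      rw [decide_eq_true_eq]
      intro m hm1 hm2; omega

lemma leftBadA_eq (row : List Int) : ∀ j,
    leftBadA row j = decide (∀ k < j, row.getD k 0 = 0) := by
  intro j
  induction j with
  | zero => simp [leftBadA]
  | succ n ih =>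
    rw [leftBadA]
    by_cases h : row.getD n 0 = 0
    · rw [if_neg (by simpa using h), ih, decide_eq_decide]
      constructor
      · intro hall k hk
        rcases Nat.lt_succ_iff_lt_or_eq.mp hk with hk | hk
        · exact hall k hk
        · subst hk; exact h
      · intro hall k hk
        exact hall k (by omega)
    · rw [if_pos (by simpa using h)]
      symm
      rw [decide_eq_false_iff_not]
      intro hall
      exact h (hall n (by omega))

lemma find?_congr_mem {α : Type} {p q : α → Bool} : ∀ (l : List α),
    (∀ x ∈ l, p x = q x) → l.find? p = l.find? q := by
  intro l
  induction l with
  | nil => intro _; rfl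
  | cons x xs ih =>
    intro h
    have hx := h x (by simp)
    simp only [List.find?_cons]
    rw [hx]
    split
    · rfl
    · exact ih (fun y hy => h y (by simp [hy]))

lemma findImpA_eq (arr : List (List Int)) : ∀ (l : List (Nat × Nat)),
    findImpA arr l = (match l.find? (fun c => decide (countA arr c.1 c.2 ≤ 2)) with
      | some c => [c] | none => []) := by
  intro l
  induction l with
  | nil => rfl
  | cons c rest ih =>
    rw [findImpA, List.find?_cons]
    by_cases h : countA arr c.1 c.2 ≤ 2 <;> simp [h, ih]

lemma foldl_nested {σ : Type} (f : σ → Nat × Nat → σ) (R C : Nat) (init : σ) :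
    (List.range R).foldl (fun st i => (List.range C).foldl (fun st j => f st (i, j)) st) init
      = (cellsOf R C).foldl f init := by
  rw [cellsOf, List.foldl_flatMap]
  apply PySem.List.foldl_congr_mem
  intro acc i _
  rw [List.foldl_map]

lemma fuseB (P : Nat × Nat → Bool) (Q : Nat × Nat → Prop) [DecidablePred Q] :
    ∀ (l : List (Nat × Nat)) (st : List (Nat × Nat) × List (Nat × Nat)),
    l.foldl (fun st c => if P c then
        (st.1 ++ [c], if st.2 = [] ∧ Q c then [c] else st.2) else st) st
      = (st.1 ++ l.filter P,
         if st.2 = [] then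
           (match (l.filter P).find? (fun c => decide (Q c)) with | some c => [c] | none => [])
         else st.2) := by
  intro l
  induction l with
  | nil =>
    intro ⟨a, b⟩
    by_cases h : b = []
    · subst h; simp
    · simp [h]
  | cons c rest ih =>
    intro st
    simp only [List.foldl_cons, List.filter_cons]
    by_cases hp : P c
    · simp only [hp, ih]
      by_cases hst : st.2 = []
      · by_cases hq : Q c
        · simp [hst, hq]
        · simp [hst, hq]
      · simp [hst]
    · simp only [hp, Bool.false_eq_true, if_false, ih]

lemma getD_mem (arr : List (List Int)) {i : Nat} (hi : i < arr.length) :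
    arr.getD i [] ∈ arr := by
  rw [List.getD_eq_getElem?_getD, List.getElem?_eq_getElem hi]
  exact List.getElem_mem hi

-- row i has length at least C under Pre_
lemma rowlen_ge (arr : List (List Int)) (h : Pre_getBadCoords arr) {i : Nat} (hi : i < arr.length) :
    (arr.headD []).length ≤ (arr.getD i []).length :=
  (h _ (getD_mem arr hi)).1

-- cells beyond column C are zero under Pre_
lemma getD_pad (l : List Int) (C j : Nat) (hCj : C ≤ j)
    (hall : (l.drop C).all (fun v => v == 0) = true) : l.getD j 0 = 0 := by
  rw [List.getD_eq_getElem?_getD]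
  cases he : l[j]? with
  | none => rfl
  | some v =>
    have h2 : (l.drop C)[j - C]? = l[j]? := by
      rw [List.getElem?_drop]
      congr 1
      omega
    have hmem : v ∈ l.drop C := List.mem_of_getElem? (h2.trans he)
    have hv := (List.all_eq_true.mp hall) v hmem
    simpa using hv

lemma padZero (arr : List (List Int)) (h : Pre_getBadCoords arr) {i j : Nat} (hi : i < arr.length)
    (hj : (arr.headD []).length ≤ j) : pvAt arr i j = 0 :=
  getD_pad (arr.getD i []) (arr.headD []).length j hj (h _ (getD_mem arr hi)).2

lemma getD_zero_head (arr : List (List Int)) (h : 0 < arr.length) :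
    arr.getD 0 [] = arr.headD [] := by
  cases arr with
  | nil => simp at h
  | cons r rs => rfl

lemma colMap_getD (arr : List (List Int)) {k : Nat} (j : Nat) (hk : k < arr.length) :
    (colMap arr j).getD k 0 = pvAt arr k j := by
  rw [colMap, List.getD_eq_getElem?_getD, List.getElem?_map,
      List.getElem?_range (by simpa using hk)]
  rfl

lemma colsB_getD (arr : List (List Int)) {j : Nat} (hj : j < (arr.headD []).length) :
    (colsB arr).getD j [] = colMap arr j := by
  rw [colsB, List.getD_eq_getElem?_getD, List.getElem?_map,
      List.getElem?_range (by simpa using hj)]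
  rfl

lemma map_getD {α β : Type} (f : α → β) (l : List α) {i : Nat} (hi : i < l.length) (d : β) (d' : α) :
    (l.map f).getD i d = f (l.getD i d') := by
  rw [List.getD_eq_getElem?_getD, List.getElem?_map, List.getElem?_eq_getElem hi,
      List.getD_eq_getElem?_getD, List.getElem?_eq_getElem hi]
  rfl

lemma nzCount_eq (l : List Int) : nzCount l = (l.countP (fun v => v != 0) : Int) := by
  rw [nzCount, PySem.List.foldl_if_add_one]
  simp

-- countP over the first C positions equals countP over the whole zero-padded row
lemma map_getD_range_take {α : Type} (l : List α) (d : α) {C : Nat} (h : C ≤ l.length) :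
    (List.range C).map (fun k => l.getD k d) = l.take C := by
  apply List.ext_getElem
  · simp; omega
  · intro i h1 h2
    simp only [List.getElem_map, List.getElem_range, List.getElem_take]
    rw [List.getD_eq_getElem?_getD, List.getElem?_eq_getElem (by simp at h1; omega)]
    rfl

lemma countP_range_pad (row : List Int) {C : Nat} (hC : C ≤ row.length)
    (hpad : (row.drop C).all (fun v => v == 0) = true) :
    (List.range C).countP (fun k => row.getD k 0 != 0) = row.countP (fun v => v != 0) := by
  have hsplit : row = row.take C ++ row.drop C := (List.take_append_drop C row).symm
  conv_rhs => rw [hsplit]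
  rw [List.countP_append]
  have hzero : (row.drop C).countP (fun v => v != 0) = 0 := by
    rw [List.countP_eq_zero]
    intro a ha
    have := (List.all_eq_true.mp hpad) a ha
    simpa using this
  rw [hzero, Nat.add_zero, ← map_getD_range_take row 0 hC, List.countP_map]
  rfl

-- count equality
lemma countA_eq (arr : List (List Int)) (h : Pre_getBadCoords arr) {i j : Nat}
    (hi : i < arr.length) (hj : j < (arr.headD []).length) :
    countA arr i j = (arr.map nzCount).getD i 0 + ((colsB arr).map nzCount).getD j 0 := by
  have h0 : (arr.getD 0 []).length = (arr.headD []).length := by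
    rw [getD_zero_head arr (by omega)]
  rw [countA]
  simp only [PySem.List.foldl_if_add_one, zero_add]
  rw [map_getD nzCount arr hi _ [],
      map_getD nzCount (colsB arr) (by simpa [colsB] using hj) _ [],
      colsB_getD arr hj, nzCount_eq, nzCount_eq]
  have hcol : (List.range arr.length).countP (fun k => pvAt arr k j != 0)
      = (colMap arr j).countP (fun v => v != 0) := by
    rw [colMap, List.countP_map]; rfl
  have hrowc : (List.range (arr.getD 0 []).length).countP (fun k => pvAt arr i k != 0)
      = (arr.getD i []).countP (fun v => v != 0) := by
    rw [h0]
    rw [← countP_range_pad (arr.getD i []) (rowlen_ge arr h hi) (h _ (getD_mem arr hi)).2]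
    rfl
  rw [hcol, hrowc]
  ring

-- flag equalities
lemma up_flag (arr : List (List Int)) {i j : Nat} (hi : i < arr.length)
    (hj : j < (arr.headD []).length) :
    (!(((colsB arr).map prefixFlags).getD j []).getD i false) = upBadA arr j i := by
  rw [map_getD prefixFlags (colsB arr) (by simpa [colsB] using hj) _ [], colsB_getD arr hj,
      prefixFlags_not_getD _ _ (by simpa [colMap] using hi), upBadA_eq]
  rw [decide_eq_decide]
  constructor
  · intro hall k hk
    have := hall k hk
    rwa [colMap_getD arr j (by omega)] at this
  · intro hall k hk
    rw [colMap_getD arr j (by omega)]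
    exact hall k hk

lemma down_flag (arr : List (List Int)) {i j : Nat} (hi : i < arr.length)
    (hj : j < (arr.headD []).length) :
    (!(((colsB arr).map (fun col => (prefixFlags col.reverse).reverse)).getD j []).getD i false)
      = downBadA arr j arr.length (i + 1) := by
  rw [map_getD _ (colsB arr) (by simpa [colsB] using hj) _ [], colsB_getD arr hj,
      sufFlags_not_getD _ _ (by simpa [colMap] using hi), downBadA_eq]
  have hlen : (colMap arr j).length = arr.length := by simp [colMap]
  rw [decide_eq_decide]
  constructor
  · intro hall m hm1 hm2
    have := hall m (by omega) (by omega)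
    rwa [colMap_getD arr j hm1] at this
  · intro hall m hm1 hm2
    rw [colMap_getD arr j (by omega)]
    exact hall m (by omega) (by omega)

lemma right_flag (arr : List (List Int)) {i j : Nat} (hi : i < arr.length)
    (hjr : j < (arr.getD i []).length) :
    (!((arr.map (fun row => (prefixFlags row.reverse).reverse)).getD i []).getD j false)
      = rightBadA (arr.getD i []) (arr.getD i []).length (j + 1) := by
  rw [map_getD _ arr hi _ [], sufFlags_not_getD _ _ hjr, rightBadA_eq]
  rw [decide_eq_decide]
  constructor
  · intro hall m hm1 hm2; exact hall m hm1 (by omega)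
  · intro hall m hm1 hm2; exact hall m hm1 (by omega)

lemma left_flag (arr : List (List Int)) {i j : Nat} (hi : i < arr.length)
    (hjr : j < (arr.getD i []).length) :
    (!((arr.map prefixFlags).getD i []).getD j false) = leftBadA (arr.getD i []) j := by
  rw [map_getD prefixFlags arr hi _ [], prefixFlags_not_getD _ _ hjr, leftBadA_eq]

lemma chainA_eq_pB (arr : List (List Int)) (h : Pre_getBadCoords arr) {i j : Nat}
    (hi : i < arr.length) (hj : j < (arr.headD []).length) :
    chainA arr i j = pB arr i j := by
  have hjr : j < (arr.getD i []).length := by have := rowlen_ge arr h hi; omega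
  rw [chainA, pB, up_flag arr hi hj, down_flag arr hi hj, right_flag arr hi hjr,
      left_flag arr hi hjr]
  by_cases h1 : pvAt arr i j = 1 <;> by_cases h2 : pvAt arr i j = 2 <;>
    by_cases h3 : pvAt arr i j = 3 <;> by_cases h4 : pvAt arr i j = 4 <;>
    simp [h1, h2, h3, h4]

-- canonical per-cell step functions
def stepA (arr : List (List Int)) (acc : List (Nat × Nat)) (c : Nat × Nat) : List (Nat × Nat) :=
  if chainA arr c.1 c.2 then acc ++ [c] else acc

def stepB (arr : List (List Int)) (st : List (Nat × Nat) × List (Nat × Nat)) (c : Nat × Nat) :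
    List (Nat × Nat) × List (Nat × Nat) :=
  if pB arr c.1 c.2 then
    (st.1 ++ [c],
     if st.2 = [] ∧ (arr.map nzCount).getD c.1 0 + ((colsB arr).map nzCount).getD c.2 0 ≤ 2 then [c] else st.2)
  else st

lemma foldl_stepA (arr : List (List Int)) (l : List (Nat × Nat)) (acc : List (Nat × Nat)) :
    l.foldl (stepA arr) acc = acc ++ l.filter (fun c => chainA arr c.1 c.2) := by
  rw [← PySem.List.foldl_append_if_eq_filter (fun c => chainA arr c.1 c.2) l acc]
  apply PySem.List.foldl_congr_mem
  intro acc c _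
  rfl

lemma fuseB_stepB (arr : List (List Int)) (l : List (Nat × Nat))
    (st : List (Nat × Nat) × List (Nat × Nat)) :
    l.foldl (stepB arr) st
      = (st.1 ++ l.filter (fun c => pB arr c.1 c.2),
         if st.2 = [] then
           (match (l.filter (fun c => pB arr c.1 c.2)).find?
               (fun c => decide ((arr.map nzCount).getD c.1 0 + ((colsB arr).map nzCount).getD c.2 0 ≤ 2)) with
            | some c => [c] | none => [])
         else st.2) := by
  rw [← fuseB (fun c => pB arr c.1 c.2)
      (fun c => (arr.map nzCount).getD c.1 0 + ((colsB arr).map nzCount).getD c.2 0 ≤ 2) l st]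
  apply PySem.List.foldl_congr_mem
  intro st c _
  rfl

-- beyond column C every cell is zero, so those iterations keep the accumulator
lemma foldl_cellCheckA_pad (arr : List (List Int)) (h : Pre_getBadCoords arr) (i : Nat)
    (hiR : i < arr.length) : ∀ (xs : List Nat),
    (∀ x ∈ xs, (arr.headD []).length ≤ x) → ∀ acc, xs.foldl (cellCheckA arr i) acc = acc := by
  intro xs
  induction xs with
  | nil => intro _ acc; rfl
  | cons x rest ih =>
    intro hmem acc
    rw [List.foldl_cons]
    have hz := padZero arr h hiR (hmem x (by simp))
    have hstep : cellCheckA arr i acc x = acc := by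
      simp [cellCheckA, hz]
    rw [hstep]
    exact ih (fun y hy => hmem y (by simp [hy])) acc

-- A's first nested loop, canonicalised
lemma badCellsA_eq (arr : List (List Int)) (h : Pre_getBadCoords arr) :
    badCellsA arr = (cellsOf arr.length (arr.headD []).length).filter
      (fun c => chainA arr c.1 c.2) := by
  rw [badCellsA]
  have step1 : ∀ (acc : List (Nat × Nat)), ∀ i ∈ List.range arr.length,
      (List.range (arr.getD i []).length).foldl (cellCheckA arr i) acc
      = (List.range (arr.headD []).length).foldl (fun acc j => stepA arr acc (i, j)) acc := by
    intro acc i hi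
    have hiR : i < arr.length := by simpa using hi
    have hge := rowlen_ge arr h hiR
    have hsplit : (arr.getD i []).length
        = (arr.headD []).length + ((arr.getD i []).length - (arr.headD []).length) := by omega
    rw [hsplit, List.range_add, List.foldl_append]
    rw [foldl_cellCheckA_pad arr h i hiR _ (by
      intro x hx
      simp only [List.mem_map, List.mem_range] at hx
      obtain ⟨y, _, rfl⟩ := hx
      omega)]
    apply PySem.List.foldl_congr_mem
    intro acc j _
    simp only [cellCheckA, stepA, chainA]
    split_ifs <;> simp_all
  rw [PySem.List.foldl_congr_mem _ _ _ _ step1, foldl_nested (stepA arr), foldl_stepA]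
  rfl

-- getBadCoords_alt, with the canonical step function folded back in
lemma alt_eq (arr : List (List Int)) :
    getBadCoords_alt arr =
      (let res := (List.range arr.length).foldl (fun st i =>
          (List.range (arr.headD []).length).foldl (fun st j => stepB arr st (i, j)) st)
          (([], []) : List (Nat × Nat) × List (Nat × Nat))
       ((res.1.map (fun c => ((c.1 : Int), (c.2 : Int)))),
        (res.2.map (fun c => ((c.1 : Int), (c.2 : Int)))))) := rfl

-- ===== VERDICT (by name: the statement is the Claim_ definition above) =====
theorem getBadCoords_spec : Claim_equal_getBadCoords := by
  intro arr _ hpre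
  unfold Spec_getBadCoords
  -- canonicalise B
  rw [alt_eq]
  simp only []
  rw [foldl_nested (stepB arr), fuseB_stepB arr]
  -- canonicalise A
  unfold getBadCoords
  rw [badCellsA_eq arr hpre, findImpA_eq]
  -- the two filters agree
  have hfilter : (cellsOf arr.length (arr.headD []).length).filter (fun c => chainA arr c.1 c.2)
      = (cellsOf arr.length (arr.headD []).length).filter (fun c => pB arr c.1 c.2) := by
    apply List.filter_congr
    intro c hc
    obtain ⟨h1, h2⟩ := mem_cellsOf.mp hc
    exact chainA_eq_pB arr hpre h1 h2
  rw [hfilter]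
  -- the two count tests agree on the filtered cells
  have hfind : ((cellsOf arr.length (arr.headD []).length).filter (fun c => pB arr c.1 c.2)).find?
        (fun c => decide (countA arr c.1 c.2 ≤ 2))
      = ((cellsOf arr.length (arr.headD []).length).filter (fun c => pB arr c.1 c.2)).find?
        (fun c => decide ((arr.map nzCount).getD c.1 0 + ((colsB arr).map nzCount).getD c.2 0 ≤ 2)) := by
    apply find?_congr_mem
    intro c hc
    obtain ⟨h1, h2⟩ := mem_cellsOf.mp (List.mem_of_mem_filter hc)
    rw [decide_eq_decide, countA_eq arr hpre h1 h2]
  rw [hfind]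
  simp only [List.nil_append]
  cases hf : ((cellsOf arr.length (arr.headD []).length).filter (fun c => pB arr c.1 c.2)).find?
      (fun c => decide ((arr.map nzCount).getD c.1 0 + ((colsB arr).map nzCount).getD c.2 0 ≤ 2)) <;> simp
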